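-- pv_equiv track=rewrite | github.com/1202-modules/interactive-classroom-api | utils/passcode.py | validate_passcode_format
-- ===== SOURCE A (Python) =====
-- import string
--
-- def validate_passcode_format(passcode: str) -> bool:
--     """
--     Validate passcode format.
--
--     Args:
--         passcode: Passcode to validate
--
--     Returns:
--         True if valid, False otherwise
--     """
--     if not passcode:
--         return False
--     if len(passcode) != 6:
--         return False
--     # Check if all characters are alphanumeric (excluding confusing chars)
--     valid_chars = set(string.ascii_uppercase + string.digits)
--     valid_chars.discard('0')
--     valid_chars.discard('O')
--     valid_chars.discard('1')
--     valid_chars.discard('I')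
--     return all(c in valid_chars for c in passcode)
-- ===== SOURCE B (Python) =====
-- import re
--
-- _PASSCODE_RE = re.compile(r'[A-HJ-NP-Z2-9]{6}')
--
-- def validate_passcode_format(passcode: str) -> bool:
--     """
--     Validate passcode format.
--
--     Args:
--         passcode: Passcode to validate
--
--     Returns:
--         True if valid, False otherwise
--     """
--     if not passcode:
--         return False
--     return bool(_PASSCODE_RE.fullmatch(passcode))
-- ===== Notes on version B (the rewrite author's own statement) =====
-- stated objective: idiomatic
-- what changed: Replaced the hand-built valid-character set and per-character membership loop with a single precompiled regular expression fullmatch r'[A-HJ-NP-Z2-9]{6}', which encodes both the length check and the allowed alphabet at once.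
import Mathlib
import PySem

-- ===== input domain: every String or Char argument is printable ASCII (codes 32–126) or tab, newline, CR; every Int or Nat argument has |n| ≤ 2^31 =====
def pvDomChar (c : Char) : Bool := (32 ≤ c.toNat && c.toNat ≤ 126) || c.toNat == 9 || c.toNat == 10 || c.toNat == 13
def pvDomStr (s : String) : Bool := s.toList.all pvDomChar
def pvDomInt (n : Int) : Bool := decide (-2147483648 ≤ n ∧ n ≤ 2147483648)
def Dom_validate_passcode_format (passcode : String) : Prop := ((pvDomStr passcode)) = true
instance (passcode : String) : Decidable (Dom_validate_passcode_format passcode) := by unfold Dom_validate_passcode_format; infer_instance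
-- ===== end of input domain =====

-- B replaces A's explicit character-set construction and membership loop by a regex fullmatch (idiomatic).

-- ===== PORT A =====
-- valid_chars = set(string.ascii_uppercase + string.digits) with '0','O','1','I' discarded
def pvValidChars : PySem.Set Char :=
  PySem.Set.discard (PySem.Set.discard (PySem.Set.discard (PySem.Set.discard
    (PySem.Set.ofList ("ABCDEFGHIJKLMNOPQRSTUVWXYZ0123456789".toList)) '0') 'O') '1') 'I'

def validate_passcode_format (passcode : String) : Bool :=
  if passcode.toList.isEmpty then false
  else if passcode.toList.length ≠ 6 then false
  else passcode.toList.all (fun c => PySem.Set.contains pvValidChars c)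

-- ===== PORT B =====
-- hand port of the regex character class [A-HJ-NP-Z2-9] (exact: ASCII ranges)
def pvClassChar (c : Char) : Bool :=
  ('A' ≤ c && c ≤ 'H') || ('J' ≤ c && c ≤ 'N') || ('P' ≤ c && c ≤ 'Z') || ('2' ≤ c && c ≤ '9')

-- hand port of re.fullmatch(r'[A-HJ-NP-Z2-9]{6}', s): exactly 6 chars, each in the class
def validate_passcode_format_alt (passcode : String) : Bool :=
  if passcode.toList.isEmpty then false
  else passcode.toList.length == 6 && passcode.toList.all pvClassChar

-- ===== PRECONDITION & SPEC =====
def Spec_validate_passcode_format (passcode : String) (out : Bool) : Prop := out = validate_passcode_format_alt passcode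
instance (passcode : String) (out : Bool) : Decidable (Spec_validate_passcode_format passcode out) := by unfold Spec_validate_passcode_format; infer_instance

-- ===== CLAIM (what is proved, stated in full; the proofs are below) =====
def Claim_equal_validate_passcode_format : Prop := ∀ (passcode : String), Dom_validate_passcode_format passcode → Spec_validate_passcode_format passcode (validate_passcode_format passcode)

-- ===== LEMMAS AND PROOFS =====

-- characters of Char are identified by their code point
theorem char_eq_iff_toNat (c d : Char) : c = d ↔ c.toNat = d.toNat := by
  constructor
  · rintro rfl; rfl
  · intro h; exact Char.ext (UInt32.toNat_inj.mp h)

-- per-character: membership in A's set equals B's regex character class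
theorem mem_pvValidChars (c : Char) :
    decide (c ∈ pvValidChars) = pvClassChar c := by
  have h : pvValidChars = ['A','B','C','D','E','F','G','H','J','K','L','M','N',
    'P','Q','R','S','T','U','V','W','X','Y','Z','2','3','4','5','6','7','8','9'] := by decide
  rw [Bool.eq_iff_iff]
  simp [h, pvClassChar, Char.le_def, UInt32.le_iff_toNat_le, char_eq_iff_toNat]
  omega

-- ===== VERDICT (by name: the statement is the Claim_ definition above) =====
theorem validate_passcode_format_spec : Claim_equal_validate_passcode_format := by
  intro p _
  unfold Spec_validate_passcode_format validate_passcode_format validate_passcode_format_alt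
  by_cases he : p.toList.isEmpty
  · simp [he]
  · simp only [he]
    by_cases hl : p.toList.length = 6
    · simp [hl, mem_pvValidChars]
    · rw [String.length_toList] at hl; simp [hl]
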